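-- pv_equiv track=rewrite | github.com/carlosekluiz-cell/ENLACE | python/pipeline/flows/datasus_health.py | _discover_columns
-- ===== SOURCE A (Python) =====
-- def _discover_columns(columns: list[str]) -> dict:
--     """Map actual CSV column names to our semantic names.
--
--     CNES CSVs may vary in column naming across releases, so we check
--     multiple candidates for each field.
--     """
--     upper_map = {c.upper().strip(): c for c in columns}
--     mapping = {}
--
--     # CNES code (unique facility identifier)
--     for candidate in [
--         "CO_CNES", "CNES", "CODE_CNES", "COD_CNES", "CO_UNIDADE",
--     ]:
--         if candidate in upper_map:
--             mapping["cnes_code"] = upper_map[candidate]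
--             break
--
--     # Facility name
--     for candidate in [
--         "NO_FANTASIA", "NO_RAZAO_SOCIAL", "NOME_FANTASIA",
--         "RAZAO_SOCIAL", "NOME", "NM_FANTASIA",
--     ]:
--         if candidate in upper_map:
--             mapping["name"] = upper_map[candidate]
--             break
--
--     # Municipality code (6 or 7 digit IBGE code)
--     for candidate in [
--         "CO_MUNICIPIO_GESTOR", "CO_IBGE", "CO_MUNICIPIO",
--         "CODUFMUN", "COD_MUNICIPIO", "IBGE", "CO_CEP_MUNICIPIO",
--     ]:
--         if candidate in upper_map:
--             mapping["municipality_code"] = upper_map[candidate]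
--             break
--
--     # Facility type code
--     for candidate in [
--         "TP_UNIDADE", "TIPO_UNIDADE", "CO_TIPO_UNIDADE",
--         "TP_ESTABELECIMENTO",
--     ]:
--         if candidate in upper_map:
--             mapping["facility_type"] = upper_map[candidate]
--             break
--
--     # Legal nature (to determine SUS contract)
--     for candidate in [
--         "CO_NATUREZA_JUR", "CO_NATUREZA_JURIDICA", "NATUREZA_JURIDICA",
--         "TP_NATUREZA_JUR",
--     ]:
--         if candidate in upper_map:
--             mapping["legal_nature"] = upper_map[candidate]
--             break
--
--     # Latitude
--     for candidate in [
--         "NU_LATITUDE", "LATITUDE", "LAT",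
--     ]:
--         if candidate in upper_map:
--             mapping["latitude"] = upper_map[candidate]
--             break
--
--     # Longitude
--     for candidate in [
--         "NU_LONGITUDE", "LONGITUDE", "LON", "LNG",
--     ]:
--         if candidate in upper_map:
--             mapping["longitude"] = upper_map[candidate]
--             break
--
--     # Bed count
--     for candidate in [
--         "QT_LEITOS", "QT_LEITOS_INTERNACAO", "LEITOS", "QT_LEITO_TOTAL",
--     ]:
--         if candidate in upper_map:
--             mapping["bed_count"] = upper_map[candidate]
--             break
--
--     # Internet access (may not be present in all CNES exports)
--     for candidate in [
--         "IN_INTERNET", "TEM_INTERNET", "ST_INTERNET",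
--     ]:
--         if candidate in upper_map:
--             mapping["has_internet"] = upper_map[candidate]
--             break
--
--     # State code (UF)
--     for candidate in [
--         "CO_ESTADO_GESTOR", "CO_UF", "UF", "SG_UF",
--     ]:
--         if candidate in upper_map:
--             mapping["state_code"] = upper_map[candidate]
--             break
--
--     return mapping
-- ===== SOURCE B (Python) =====
-- _TABLE = [
--     ("cnes_code", ["CO_CNES", "CNES", "CODE_CNES", "COD_CNES", "CO_UNIDADE"]),
--     ("name", ["NO_FANTASIA", "NO_RAZAO_SOCIAL", "NOME_FANTASIA",
--               "RAZAO_SOCIAL", "NOME", "NM_FANTASIA"]),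
--     ("municipality_code", ["CO_MUNICIPIO_GESTOR", "CO_IBGE", "CO_MUNICIPIO",
--                            "CODUFMUN", "COD_MUNICIPIO", "IBGE", "CO_CEP_MUNICIPIO"]),
--     ("facility_type", ["TP_UNIDADE", "TIPO_UNIDADE", "CO_TIPO_UNIDADE",
--                        "TP_ESTABELECIMENTO"]),
--     ("legal_nature", ["CO_NATUREZA_JUR", "CO_NATUREZA_JURIDICA", "NATUREZA_JURIDICA",
--                       "TP_NATUREZA_JUR"]),
--     ("latitude", ["NU_LATITUDE", "LATITUDE", "LAT"]),
--     ("longitude", ["NU_LONGITUDE", "LONGITUDE", "LON", "LNG"]),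
--     ("bed_count", ["QT_LEITOS", "QT_LEITOS_INTERNACAO", "LEITOS", "QT_LEITO_TOTAL"]),
--     ("has_internet", ["IN_INTERNET", "TEM_INTERNET", "ST_INTERNET"]),
--     ("state_code", ["CO_ESTADO_GESTOR", "CO_UF", "UF", "SG_UF"]),
-- ]
--
-- # Reverse index: candidate name -> (semantic field, priority rank).
-- _INDEX = {cand: (field, rank)
--           for field, cands in _TABLE
--           for rank, cand in enumerate(cands)}
--
--
-- def _discover_columns(columns: list[str]) -> dict:
--     """Single pass over the columns using a reverse candidate index."""
--     best = {}
--     for col in columns: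
--         hit = _INDEX.get(col.upper().strip())
--         if hit is not None:
--             field, rank = hit
--             cur = best.get(field)
--             if cur is None or rank <= cur[0]:
--                 best[field] = (rank, col)
--     return {field: best[field][1] for field, _ in _TABLE if field in best}
-- ===== Notes on version B (the rewrite author's own statement) =====
-- stated objective: alternative
-- what changed: Replaces the uppercase->column dict plus ten candidate-priority scans by a precomputed reverse index (candidate -> (field, rank)) and one pass over the columns keeping, per field, the best-ranked (and on equal rank latest) column.
import Mathlib
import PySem

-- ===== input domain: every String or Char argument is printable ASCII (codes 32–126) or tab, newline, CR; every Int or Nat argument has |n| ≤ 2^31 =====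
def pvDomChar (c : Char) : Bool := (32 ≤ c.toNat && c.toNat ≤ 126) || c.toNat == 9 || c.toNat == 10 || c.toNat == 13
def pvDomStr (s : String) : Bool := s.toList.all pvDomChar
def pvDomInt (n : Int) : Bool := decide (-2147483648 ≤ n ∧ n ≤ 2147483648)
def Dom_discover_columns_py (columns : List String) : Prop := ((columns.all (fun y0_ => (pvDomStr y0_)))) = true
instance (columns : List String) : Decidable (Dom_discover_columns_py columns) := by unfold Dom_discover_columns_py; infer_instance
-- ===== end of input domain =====

-- B replaces A's uppercase->column dict plus ten candidate-priority scans by a reverse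
-- candidate index and ONE pass over the columns keeping the best-ranked column per field
-- (objective: alternative decomposition; same return value).

-- ===== PORT A =====
-- c.upper().strip()
def pvNorm (c : String) : String := PySem.Str.strip (PySem.Str.upper c)

-- {c.upper().strip(): c for c in columns}
def pvUpperMap (columns : List String) : PySem.Dict String String :=
  columns.foldl (fun d c => d.insert (pvNorm c) c) PySem.Dict.empty

-- for candidate in [...]: if candidate in upper_map: return upper_map[candidate] (break)
def pvPickA (um : PySem.Dict String String) : List String → Option String
  | [] => none
  | cand :: rest =>
    match um.get? cand with
    | some v => some v
    | none => pvPickA um rest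

-- mapping[field] = v  (when the scan found one)
def pvAddA (m : PySem.Dict String String) (field : String) (v? : Option String) :
    PySem.Dict String String :=
  match v? with
  | some v => m.insert field v
  | none => m

def discover_columns_py (columns : List String) : List (String × String) :=
  let um := pvUpperMap columns
  let m0 : PySem.Dict String String := PySem.Dict.empty
  let m1 := pvAddA m0 "cnes_code" (pvPickA um ["CO_CNES", "CNES", "CODE_CNES", "COD_CNES", "CO_UNIDADE"])
  let m2 := pvAddA m1 "name" (pvPickA um ["NO_FANTASIA", "NO_RAZAO_SOCIAL", "NOME_FANTASIA", "RAZAO_SOCIAL", "NOME", "NM_FANTASIA"])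
  let m3 := pvAddA m2 "municipality_code" (pvPickA um ["CO_MUNICIPIO_GESTOR", "CO_IBGE", "CO_MUNICIPIO", "CODUFMUN", "COD_MUNICIPIO", "IBGE", "CO_CEP_MUNICIPIO"])
  let m4 := pvAddA m3 "facility_type" (pvPickA um ["TP_UNIDADE", "TIPO_UNIDADE", "CO_TIPO_UNIDADE", "TP_ESTABELECIMENTO"])
  let m5 := pvAddA m4 "legal_nature" (pvPickA um ["CO_NATUREZA_JUR", "CO_NATUREZA_JURIDICA", "NATUREZA_JURIDICA", "TP_NATUREZA_JUR"])
  let m6 := pvAddA m5 "latitude" (pvPickA um ["NU_LATITUDE", "LATITUDE", "LAT"])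
  let m7 := pvAddA m6 "longitude" (pvPickA um ["NU_LONGITUDE", "LONGITUDE", "LON", "LNG"])
  let m8 := pvAddA m7 "bed_count" (pvPickA um ["QT_LEITOS", "QT_LEITOS_INTERNACAO", "LEITOS", "QT_LEITO_TOTAL"])
  let m9 := pvAddA m8 "has_internet" (pvPickA um ["IN_INTERNET", "TEM_INTERNET", "ST_INTERNET"])
  let m10 := pvAddA m9 "state_code" (pvPickA um ["CO_ESTADO_GESTOR", "CO_UF", "UF", "SG_UF"])
  m10.items

-- ===== PORT B =====
def pvTable : List (String × List String) :=
  [("cnes_code", ["CO_CNES", "CNES", "CODE_CNES", "COD_CNES", "CO_UNIDADE"]),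
   ("name", ["NO_FANTASIA", "NO_RAZAO_SOCIAL", "NOME_FANTASIA", "RAZAO_SOCIAL", "NOME", "NM_FANTASIA"]),
   ("municipality_code", ["CO_MUNICIPIO_GESTOR", "CO_IBGE", "CO_MUNICIPIO", "CODUFMUN", "COD_MUNICIPIO", "IBGE", "CO_CEP_MUNICIPIO"]),
   ("facility_type", ["TP_UNIDADE", "TIPO_UNIDADE", "CO_TIPO_UNIDADE", "TP_ESTABELECIMENTO"]),
   ("legal_nature", ["CO_NATUREZA_JUR", "CO_NATUREZA_JURIDICA", "NATUREZA_JURIDICA", "TP_NATUREZA_JUR"]),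
   ("latitude", ["NU_LATITUDE", "LATITUDE", "LAT"]),
   ("longitude", ["NU_LONGITUDE", "LONGITUDE", "LON", "LNG"]),
   ("bed_count", ["QT_LEITOS", "QT_LEITOS_INTERNACAO", "LEITOS", "QT_LEITO_TOTAL"]),
   ("has_internet", ["IN_INTERNET", "TEM_INTERNET", "ST_INTERNET"]),
   ("state_code", ["CO_ESTADO_GESTOR", "CO_UF", "UF", "SG_UF"])]

-- _INDEX = {cand: (field, rank) for field, cands in _TABLE for rank, cand in enumerate(cands)}
def pvIndex : PySem.Dict String (String × Nat) :=
  pvTable.foldl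
    (fun d fc => fc.2.zipIdx.foldl (fun d rc => d.insert rc.1 (fc.1, rc.2)) d)
    PySem.Dict.empty

-- body of B's single loop over the columns
def pvStep (b : PySem.Dict String (Nat × String)) (col : String) :
    PySem.Dict String (Nat × String) :=
  match pvIndex.get? (pvNorm col) with
  | some fr =>
    match b.get? fr.1 with
    | none => b.insert fr.1 (fr.2, col)
    | some cur => if fr.2 ≤ cur.1 then b.insert fr.1 (fr.2, col) else b
  | none => b

-- {field: best[field][1] ...}: one entry when the field was seen
def pvAddB (m : PySem.Dict String String) (field : String) (p? : Option (Nat × String)) :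
    PySem.Dict String String :=
  match p? with
  | some p => m.insert field p.2
  | none => m

def discover_columns_py_alt (columns : List String) : List (String × String) :=
  let best := columns.foldl pvStep PySem.Dict.empty
  (pvTable.foldl (fun m fc => pvAddB m fc.1 (best.get? fc.1)) PySem.Dict.empty).items

-- ===== PRECONDITION & SPEC =====
def Spec_discover_columns_py (columns : List String) (out : List (String × String)) : Prop := out = discover_columns_py_alt columns
instance (columns : List String) (out : List (String × String)) : Decidable (Spec_discover_columns_py columns out) := by unfold Spec_discover_columns_py; infer_instance

-- ===== CLAIM (what is proved, stated in full; the proofs are below) =====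
def Claim_equal_discover_columns_py : Prop := ∀ (columns : List String), Dom_discover_columns_py columns → Spec_discover_columns_py columns (discover_columns_py columns)

-- ===== LEMMAS AND PROOFS =====

-- what B's loop does to the entry of one fixed field f
def pvG (f : String) (cur : Option (Nat × String)) (col : String) : Option (Nat × String) :=
  match pvIndex.get? (pvNorm col) with
  | some fr =>
    if fr.1 = f then
      match cur with
      | none => some (fr.2, col)
      | some c0 => if fr.2 ≤ c0.1 then some (fr.2, col) else cur
    else cur
  | none => cur

-- B's dict-valued fold, observed at one key, is the scalar fold pvG
theorem pv_step_get (cols : List String) (f : String) :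
    ∀ b : PySem.Dict String (Nat × String),
      (cols.foldl pvStep b).get? f = cols.foldl (pvG f) (b.get? f) := by
  induction cols with
  | nil => intro b; rfl
  | cons c cs ih =>
    intro b
    have hstep : (pvStep b c).get? f = pvG f (b.get? f) c := by
      unfold pvStep pvG
      cases hi : pvIndex.get? (pvNorm c) with
      | none => rfl
      | some fr =>
        by_cases hf : fr.1 = f
        · subst hf
          cases hb : b.get? fr.1 with
          | none => simp [PySem.Dict.get?_insert_self, hb]
          | some cur =>
            by_cases hle : fr.2 ≤ cur.1 <;>
              simp [hle, PySem.Dict.get?_insert_self, hb]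
        · have hne : f ≠ fr.1 := fun h => hf h.symm
          simp only [if_neg hf]
          cases hb : b.get? fr.1 with
          | none => simp [PySem.Dict.get?_insert_of_ne _ _ hne]
          | some cur =>
            by_cases hle : fr.2 ≤ cur.1 <;>
              simp [hle, PySem.Dict.get?_insert_of_ne _ _ hne]
    simp only [List.foldl_cons]
    rw [ih, hstep]

-- A's upper_map lookup is "last column whose normalisation is k"
theorem pv_upper_get (cols : List String) (k : String) :
    ∀ d : PySem.Dict String String,
      (cols.foldl (fun d c => d.insert (pvNorm c) c) d).get? k =
        (match cols.reverse.find? (fun c => pvNorm c == k) with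
         | some c => some c
         | none => d.get? k) := by
  induction cols with
  | nil => intro d; rfl
  | cons c cs ih =>
    intro d
    simp only [List.foldl_cons, List.reverse_cons]
    rw [ih, List.find?_append]
    cases h : cs.reverse.find? (fun c => pvNorm c == k) with
    | some v => rfl
    | none =>
      by_cases hk : pvNorm c = k
      · subst hk
        simp [List.find?, PySem.Dict.get?_insert_self]
      · have hbe : (pvNorm c == k) = false := by simp [hk]
        simp [List.find?, hbe, PySem.Dict.get?_insert_of_ne _ _ (Ne.symm hk)]

-- A's candidate scan returns none when no column normalises into cands
theorem pv_pick_none (cols : List String) :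
    ∀ cands : List String,
      (∀ c ∈ cols, ∀ i : Nat, cands[i]? ≠ some (pvNorm c)) →
      pvPickA (pvUpperMap cols) cands = none := by
  intro cands
  induction cands with
  | nil => intro _; rfl
  | cons cand rest ih =>
    intro h
    have hfind : cols.reverse.find? (fun c => pvNorm c == cand) = none := by
      rw [List.find?_eq_none]
      intro c hc
      have h0 := h c (List.mem_reverse.mp hc) 0
      simp only [List.getElem?_cons_zero, ne_eq, Option.some.injEq] at h0
      simp only [beq_iff_eq]
      exact fun he => h0 he.symm
    have hget : (pvUpperMap cols).get? cand = none := by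
      unfold pvUpperMap
      rw [pv_upper_get, hfind]
      simp [PySem.Dict.get?_empty]
    simp only [pvPickA, hget]
    exact ih (fun c hc i => by simpa using h c hc (i + 1))

-- A's candidate scan, pinned down by a first matching rank r and its last matching column v
theorem pv_pick_at (cols : List String) :
    ∀ (cands : List String) (r : Nat) (k v : String),
      cands[r]? = some k →
      cols.reverse.find? (fun c => pvNorm c == k) = some v →
      (∀ c ∈ cols, ∀ j : Nat, j < r → cands[j]? ≠ some (pvNorm c)) →
      pvPickA (pvUpperMap cols) cands = some v := by
  intro cands
  induction cands with
  | nil => intro r k v hk; simp at hk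
  | cons cand rest ih =>
    intro r k v hk hfind hlow
    cases r with
    | zero =>
      simp only [List.getElem?_cons_zero, Option.some.injEq] at hk
      subst hk
      have hget : (pvUpperMap cols).get? cand = some v := by
        unfold pvUpperMap
        rw [pv_upper_get, hfind]
      simp only [pvPickA, hget]
    | succ r' =>
      have hfind0 : cols.reverse.find? (fun c => pvNorm c == cand) = none := by
        rw [List.find?_eq_none]
        intro c hc
        have h0 := hlow c (List.mem_reverse.mp hc) 0 (Nat.succ_pos r')
        simp only [List.getElem?_cons_zero, ne_eq, Option.some.injEq] at h0
        simp only [beq_iff_eq]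
        exact fun he => h0 he.symm
      have hget : (pvUpperMap cols).get? cand = none := by
        unfold pvUpperMap
        rw [pv_upper_get, hfind0]
        simp [PySem.Dict.get?_empty]
      simp only [pvPickA, hget]
      exact ih r' k v (by simpa using hk) hfind
        (fun c hc j hj => by simpa using hlow c hc (j + 1) (Nat.succ_lt_succ hj))

-- loop invariant of B's scalar fold for one field
def pvInv (cands cols : List String) : Option (Nat × String) → Prop
  | none => ∀ c ∈ cols, ∀ i : Nat, cands[i]? ≠ some (pvNorm c)
  | some rv => cands[rv.1]? = some (pvNorm rv.2) ∧
      cols.reverse.find? (fun c => pvNorm c == pvNorm rv.2) = some rv.2 ∧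
      ∀ c ∈ cols, ∀ j : Nat, j < rv.1 → cands[j]? ≠ some (pvNorm c)

-- what ties a field name to its candidate list through the reverse index
def pvField (f : String) (cands : List String) : Prop :=
  cands.Nodup ∧
  (∀ p ∈ cands.zipIdx, pvIndex.get? p.1 = some (f, p.2)) ∧
  (∀ p ∈ pvIndex.items, p.2.1 = f → cands[p.2.2]? = some p.1)

theorem pvInv_extend (cands cols : List String) (c : String) (o : Option (Nat × String))
    (h : pvInv cands cols o) (hno : ∀ i : Nat, cands[i]? ≠ some (pvNorm c)) :
    pvInv cands (cols ++ [c]) o := by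
  cases o with
  | none =>
    simp only [pvInv] at h ⊢
    intro c' hc' i
    rcases List.mem_append.mp hc' with h1 | h1
    · exact h c' h1 i
    · have hcc : c' = c := by simpa using h1
      subst hcc
      exact hno i
  | some rv =>
    simp only [pvInv] at h ⊢
    obtain ⟨h1, h2, h3⟩ := h
    refine ⟨h1, ?_, ?_⟩
    · rw [List.reverse_append]
      simp only [List.reverse_singleton, List.singleton_append]
      rw [List.find?_cons_of_neg, h2]
      simp only [beq_iff_eq]
      intro he
      exact hno rv.1 (by rw [← he] at h1; exact h1)
    · intro c' hc' j hj
      rcases List.mem_append.mp hc' with h1' | h1'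
      · exact h3 c' h1' j hj
      · have hcc : c' = c := by simpa using h1'
        subst hcc
        exact hno j

set_option maxRecDepth 10000 in
set_option maxHeartbeats 4000000 in
theorem pv_inv (f : String) (cands : List String) (hF : pvField f cands) :
    ∀ cols : List String, pvInv cands cols (cols.foldl (pvG f) none) := by
  obtain ⟨hnd, hcmp, hsnd⟩ := hF
  have hcomp : ∀ (i : Nat) (k : String), cands[i]? = some k → pvIndex.get? k = some (f, i) := by
    intro i k hik
    exact hcmp (k, i) (List.mk_mem_zipIdx_iff_getElem?.mpr hik)
  have hsound : ∀ (k : String) (r : Nat), pvIndex.get? k = some (f, r) → cands[r]? = some k := by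
    intro k r hk
    exact hsnd (k, (f, r)) (PySem.Dict.mem_items_of_get?_eq_some _ hk) rfl
  have huniq : ∀ (i j : Nat) (k : String), cands[i]? = some k → cands[j]? = some k → i = j := by
    intro i j k hi hj
    obtain ⟨hlen, -⟩ := List.getElem?_eq_some_iff.mp hi
    exact List.getElem?_inj hlen hnd (hi.trans hj.symm)
  have key : ∀ (c : String) (cols : List String) (o : Option (Nat × String)),
      pvInv cands cols o → pvInv cands (cols ++ [c]) (pvG f o c) := by
    intro c cols o ho
    unfold pvG
    cases hi : pvIndex.get? (pvNorm c) with
    | none =>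
      apply pvInv_extend _ _ _ _ ho
      intro i hik
      rw [hcomp i _ hik] at hi
      cases hi
    | some fr =>
      by_cases hf : fr.1 = f
      · have hci : cands[fr.2]? = some (pvNorm c) := by
          apply hsound
          rw [hi]
          obtain ⟨f1, r1⟩ := fr
          simp only at hf
          rw [hf]
        simp only [if_pos hf]
        cases o with
        | none =>
          simp only [pvInv] at ho ⊢
          refine ⟨hci, ?_, ?_⟩
          · rw [List.reverse_append]
            simp only [List.reverse_singleton, List.singleton_append]
            rw [List.find?_cons_of_pos]
            simp
          · intro c' hc' j hj
            rcases List.mem_append.mp hc' with h1 | h1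
            · exact ho c' h1 j
            · have hcc : c' = c := by simpa using h1
              subst hcc
              intro hjc
              exact absurd (huniq j fr.2 _ hjc hci) (Nat.ne_of_lt hj)
        | some cur =>
          simp only [pvInv] at ho ⊢
          obtain ⟨ih1, ih2, ih3⟩ := ho
          by_cases hle : fr.2 ≤ cur.1
          · simp only [if_pos hle]
            refine ⟨hci, ?_, ?_⟩
            · rw [List.reverse_append]
              simp only [List.reverse_singleton, List.singleton_append]
              rw [List.find?_cons_of_pos]
              simp
            · intro c' hc' j hj
              rcases List.mem_append.mp hc' with h1 | h1
              · exact ih3 c' h1 j (Nat.lt_of_lt_of_le hj hle)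
              · have hcc : c' = c := by simpa using h1
                subst hcc
                intro hjc
                exact absurd (huniq j fr.2 _ hjc hci) (Nat.ne_of_lt hj)
          · simp only [if_neg hle]
            refine ⟨ih1, ?_, ?_⟩
            · rw [List.reverse_append]
              simp only [List.reverse_singleton, List.singleton_append]
              rw [List.find?_cons_of_neg, ih2]
              simp only [beq_iff_eq]
              intro he
              have hcur : cands[cur.1]? = some (pvNorm c) := by rw [← he] at ih1; exact ih1
              have := huniq cur.1 fr.2 _ hcur hci
              omega
            · intro c' hc' j hj
              rcases List.mem_append.mp hc' with h1 | h1
              · exact ih3 c' h1 j hj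
              · have hcc : c' = c := by simpa using h1
                subst hcc
                intro hjc
                have := huniq j fr.2 _ hjc hci
                omega
      · simp only [if_neg hf]
        apply pvInv_extend _ _ _ _ ho
        intro i hik
        have hfr := (hcomp i _ hik).symm.trans hi
        injection hfr with h
        exact hf (by rw [← h])
  intro cols
  induction cols using List.reverseRecOn with
  | nil =>
    simp only [List.foldl_nil, pvInv]
    intro c hc
    simp at hc
  | append_singleton cols c ih =>
    rw [List.foldl_append, List.foldl_cons, List.foldl_nil]
    exact key c cols (cols.foldl (pvG f) none) ih

theorem pv_field_eq (f : String) (cands : List String) (hF : pvField f cands)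
    (cols : List String) :
    pvPickA (pvUpperMap cols) cands = (cols.foldl (pvG f) none).map Prod.snd := by
  have hinv := pv_inv f cands hF cols
  cases hQ : cols.foldl (pvG f) none with
  | none =>
    rw [hQ] at hinv
    simpa using pv_pick_none cols cands hinv
  | some rv =>
    rw [hQ] at hinv
    obtain ⟨h1, h2, h3⟩ := hinv
    simpa using pv_pick_at cols cands rv.1 (pvNorm rv.2) rv.2 h1 h2 h3

theorem pv_addA_map (m : PySem.Dict String String) (f : String) (o : Option (Nat × String)) :
    pvAddA m f (o.map Prod.snd) = pvAddB m f o := by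
  cases o <;> rfl

-- ===== VERDICT (by name: the statement is the Claim_ definition above) =====
set_option maxRecDepth 100000 in
set_option maxHeartbeats 2000000 in
theorem discover_columns_py_spec : Claim_equal_discover_columns_py := by
  unfold Claim_equal_discover_columns_py
  intro cols _
  unfold Spec_discover_columns_py discover_columns_py discover_columns_py_alt
  have hbest : ∀ f : String,
      (cols.foldl pvStep PySem.Dict.empty).get? f = cols.foldl (pvG f) none := by
    intro f
    rw [pv_step_get]
    rfl
  simp only [pvTable, List.foldl_cons, List.foldl_nil]
  rw [hbest, hbest, hbest, hbest, hbest, hbest, hbest, hbest, hbest, hbest]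
  rw [pv_field_eq "cnes_code" _ (by unfold pvField; decide) cols,
      pv_field_eq "name" _ (by unfold pvField; decide) cols,
      pv_field_eq "municipality_code" _ (by unfold pvField; decide) cols,
      pv_field_eq "facility_type" _ (by unfold pvField; decide) cols,
      pv_field_eq "legal_nature" _ (by unfold pvField; decide) cols,
      pv_field_eq "latitude" _ (by unfold pvField; decide) cols,
      pv_field_eq "longitude" _ (by unfold pvField; decide) cols,
      pv_field_eq "bed_count" _ (by unfold pvField; decide) cols,
      pv_field_eq "has_internet" _ (by unfold pvField; decide) cols,
      pv_field_eq "state_code" _ (by unfold pvField; decide) cols]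
  simp only [pv_addA_map]
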